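-- pv_equiv track=rewrite | github.com/zyzy898/video-toAI-md-pdf-main | app.py | _normalize_received_chunks
-- ===== SOURCE A (Python) =====
-- from typing import Any, Callable, Dict, List, Tuple
--
-- def _safe_int(
--     value: Any, default: int, min_value: int | None = None, max_value: int | None = None
-- ) -> int:
--     try:
--         number = int(value)
--     except (TypeError, ValueError):
--         number = default
--     if min_value is not None:
--         number = max(min_value, number)
--     if max_value is not None:
--         number = min(max_value, number)
--     return number
--
-- def _normalize_received_chunks(raw_chunks: Any, total_chunks: int) -> List[int]:
--     if total_chunks <= 0 or not isinstance(raw_chunks, list):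
--         return []
--     received: set[int] = set()
--     for item in raw_chunks:
--         idx = _safe_int(item, -1)
--         if 0 <= idx < total_chunks:
--             received.add(idx)
--     return sorted(received)
-- ===== SOURCE B (Python) =====
-- def _safe_int(value, default, min_value=None, max_value=None):
--     try:
--         number = int(value)
--     except (TypeError, ValueError):
--         number = default
--     if min_value is not None:
--         number = max(min_value, number)
--     if max_value is not None:
--         number = min(max_value, number)
--     return number
--
--
-- def _normalize_received_chunks(raw_chunks, total_chunks):
--     if total_chunks <= 0 or not isinstance(raw_chunks, list):
--         return []
--     out = []
--     prev = None
--     for idx in sorted(_safe_int(x, -1) for x in raw_chunks):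
--         if 0 <= idx < total_chunks and idx != prev:
--             out.append(idx)
--             prev = idx
--     return out
-- ===== Notes on version B (the rewrite author's own statement) =====
-- stated objective: alternative
-- what changed: Replaces A's hash-set accumulation followed by sorting the set with a sort-first pipeline: sort all candidate indices once, then a single linear scan that filters out-of-range values and drops adjacent duplicates via a 'prev' sentinel, so no set is ever built.
import Mathlib
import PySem

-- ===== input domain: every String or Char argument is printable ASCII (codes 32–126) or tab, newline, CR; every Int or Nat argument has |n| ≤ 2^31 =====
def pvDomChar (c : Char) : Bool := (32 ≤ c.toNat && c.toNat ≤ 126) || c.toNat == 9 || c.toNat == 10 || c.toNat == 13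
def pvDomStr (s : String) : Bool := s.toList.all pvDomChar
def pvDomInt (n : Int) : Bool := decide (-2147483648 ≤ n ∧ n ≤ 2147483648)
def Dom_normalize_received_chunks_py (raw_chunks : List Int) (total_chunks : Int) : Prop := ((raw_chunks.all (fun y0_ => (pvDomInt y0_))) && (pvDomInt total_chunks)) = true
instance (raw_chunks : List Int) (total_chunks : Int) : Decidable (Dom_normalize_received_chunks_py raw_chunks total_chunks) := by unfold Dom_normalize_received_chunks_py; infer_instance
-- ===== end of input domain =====

-- B replaces A's hash-set-then-sort with sort-first plus one linear scan dropping out-of-range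
-- values and adjacent duplicates (objective: alternative algorithm of the same cost).


-- ===== PORT A =====
-- _safe_int(value, -1): int(value) on an int IS that int and no min/max bound is passed,
-- so on the Int domain the helper is exact as the identity on `value` (exceptions unreachable).
def safe_int (value : Int) (_default : Int) : Int :=
  let number := value
  number

-- `isinstance(raw_chunks, list)` is always true under the List Int typing.
def normalize_received_chunks_py (raw_chunks : List Int) (total_chunks : Int) : List Int :=
  if total_chunks ≤ 0 then []
  else
    let received : PySem.Set Int := raw_chunks.foldl (fun received item =>
      let idx := safe_int item (-1)
      if 0 ≤ idx ∧ idx < total_chunks then PySem.Set.add received idx else received)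
      PySem.Set.empty
    PySem.List.sorted received (fun x => x) false

-- ===== PORT B =====
def safe_int_alt (value : Int) (_default : Int) : Int :=
  let number := value
  number

def normalize_received_chunks_py_alt (raw_chunks : List Int) (total_chunks : Int) : List Int :=
  if total_chunks ≤ 0 then []
  else
    let s := PySem.List.sorted (raw_chunks.map (fun x => safe_int_alt x (-1))) (fun x => x) false
    (s.foldl (fun st idx =>
        if (0 ≤ idx ∧ idx < total_chunks) ∧ st.2 ≠ some idx
        then (st.1 ++ [idx], (some idx : Option Int))
        else st) (([] : List Int), (none : Option Int))).1

-- ===== PRECONDITION & SPEC =====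
def Spec_normalize_received_chunks_py (raw_chunks : List Int) (total_chunks : Int) (out : List Int) : Prop := out = normalize_received_chunks_py_alt raw_chunks total_chunks
instance (raw_chunks : List Int) (total_chunks : Int) (out : List Int) : Decidable (Spec_normalize_received_chunks_py raw_chunks total_chunks out) := by unfold Spec_normalize_received_chunks_py; infer_instance

-- ===== CLAIM (what is proved, stated in full; the proofs are below) =====
def Claim_equal_normalize_received_chunks_py : Prop := ∀ (raw_chunks : List Int) (total_chunks : Int), Dom_normalize_received_chunks_py raw_chunks total_chunks → Spec_normalize_received_chunks_py raw_chunks total_chunks (normalize_received_chunks_py raw_chunks total_chunks)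

-- ===== LEMMAS AND PROOFS =====

-- A's conditional Set.add fold is the plain Set.add fold of the filtered list.
theorem foldl_add_if_eq_filter (total : Int) :
    ∀ (l : List Int) (s0 : PySem.Set Int),
      l.foldl (fun s x => if 0 ≤ x ∧ x < total then PySem.Set.add s x else s) s0
        = (l.filter (fun x => decide (0 ≤ x ∧ x < total))).foldl PySem.Set.add s0 := by
  intro l
  induction l with
  | nil => intro s0; rfl
  | cons x t ih =>
      intro s0
      by_cases hx : 0 ≤ x ∧ x < total <;>
        simp [List.foldl_cons, hx, ih]

-- One induction giving everything about B's scan of a sorted list: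
-- the output is strictly increasing and contains exactly the in-range elements.
theorem scan_spec (total : Int) :
    ∀ (l acc : List Int) (prev : Option Int),
      l.Pairwise (· ≤ ·) →
      acc.Pairwise (· < ·) →
      (∀ p, prev = some p → (∀ a ∈ acc, a ≤ p) ∧ (∀ x ∈ l, p ≤ x) ∧ p ∈ acc) →
      (prev = none → acc = []) →
      (l.foldl (fun st idx =>
          if (0 ≤ idx ∧ idx < total) ∧ st.2 ≠ some idx
          then (st.1 ++ [idx], (some idx : Option Int))
          else st) (acc, prev)).1.Pairwise (· < ·) ∧
      ∀ y, (y ∈ (l.foldl (fun st idx =>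
          if (0 ≤ idx ∧ idx < total) ∧ st.2 ≠ some idx
          then (st.1 ++ [idx], (some idx : Option Int))
          else st) (acc, prev)).1 ↔ y ∈ acc ∨ (0 ≤ y ∧ y < total ∧ y ∈ l)) := by
  intro l
  induction l with
  | nil =>
      intro acc prev _ hacc _ _
      simpa using hacc
  | cons x t ih =>
      intro acc prev hsort hacc hprev hnone
      have hx_le : ∀ z ∈ t, x ≤ z := (List.pairwise_cons.mp hsort).1
      have hsort' : t.Pairwise (· ≤ ·) := (List.pairwise_cons.mp hsort).2
      by_cases hc : (0 ≤ x ∧ x < total) ∧ prev ≠ some x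
      · -- append x
        have hlt : ∀ a ∈ acc, a < x := by
          intro a ha
          cases prev with
          | none => simp [hnone rfl] at ha
          | some p =>
              obtain ⟨h1, h2, _⟩ := hprev p rfl
              have hpx : p ≤ x := h2 x (by simp)
              have : p ≠ x := fun h => hc.2 (by rw [h])
              exact lt_of_le_of_lt (h1 a ha) (lt_of_le_of_ne hpx this)
        have hacc' : (acc ++ [x]).Pairwise (· < ·) := by
          rw [List.pairwise_append]
          exact ⟨hacc, List.pairwise_singleton _ _, fun a ha b hb => by
            simp at hb; subst hb; exact hlt a ha⟩
        have hprev' : ∀ p, (some x : Option Int) = some p →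
            (∀ a ∈ acc ++ [x], a ≤ p) ∧ (∀ z ∈ t, p ≤ z) ∧ p ∈ acc ++ [x] := by
          intro p hp
          injection hp with hp; subst hp
          refine ⟨?_, hx_le, by simp⟩
          intro a ha
          rcases List.mem_append.mp ha with h | h
          · exact le_of_lt (hlt a h)
          · simp at h; subst h; exact le_refl _
        have := ih (acc ++ [x]) (some x) hsort' hacc' hprev' (by intro h; cases h)
        simp only [List.foldl_cons, if_pos hc]
        refine ⟨this.1, ?_⟩
        intro y
        rw [this.2 y]
        constructor
        · rintro (h | h)
          · rcases List.mem_append.mp h with h | h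
            · exact Or.inl h
            · simp at h; subst h; exact Or.inr ⟨hc.1.1, hc.1.2, by simp⟩
          · exact Or.inr ⟨h.1, h.2.1, by simp [h.2.2]⟩
        · rintro (h | ⟨h1, h2, h3⟩)
          · exact Or.inl (List.mem_append.mpr (Or.inl h))
          · rcases List.mem_cons.mp h3 with h | h
            · subst h; exact Or.inl (by simp)
            · exact Or.inr ⟨h1, h2, h⟩
      · -- skip x
        have hprev' : ∀ p, prev = some p →
            (∀ a ∈ acc, a ≤ p) ∧ (∀ z ∈ t, p ≤ z) ∧ p ∈ acc := by
          intro p hp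
          obtain ⟨h1, h2, h3⟩ := hprev p hp
          exact ⟨h1, fun z hz => h2 z (by simp [hz]), h3⟩
        have := ih acc prev hsort' hacc hprev' hnone
        simp only [List.foldl_cons, if_neg hc]
        refine ⟨this.1, ?_⟩
        intro y
        rw [this.2 y]
        constructor
        · rintro (h | h)
          · exact Or.inl h
          · exact Or.inr ⟨h.1, h.2.1, by simp [h.2.2]⟩
        · rintro (h | ⟨h1, h2, h3⟩)
          · exact Or.inl h
          · rcases List.mem_cons.mp h3 with h | h
            · subst h
              -- x is valid here (else ¬(0 ≤ x ∧ x < total) contradicts ⟨h1,h2⟩), so prev = some x and x ∈ acc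
              have : prev = some y := by
                by_cases hp : prev = some y
                · exact hp
                · exact absurd ⟨⟨h1, h2⟩, hp⟩ hc
              exact Or.inl (hprev y this).2.2
            · exact Or.inr ⟨h1, h2, h⟩

theorem normalize_received_chunks_py_eq (raw_chunks : List Int) (total_chunks : Int) :
    normalize_received_chunks_py raw_chunks total_chunks
      = normalize_received_chunks_py_alt raw_chunks total_chunks := by
  unfold normalize_received_chunks_py normalize_received_chunks_py_alt
  by_cases ht : total_chunks ≤ 0
  · simp [ht]
  · simp only [if_neg ht]
    -- B's sorted input list
    have hmap : raw_chunks.map (fun x => safe_int_alt x (-1)) = raw_chunks := by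
      simp [safe_int_alt]
    set s := PySem.List.sorted (raw_chunks.map (fun x => safe_int_alt x (-1))) (fun x => x) false with hs
    have hsorted : s.Pairwise (· ≤ ·) := by
      simpa using PySem.List.sorted_pairwise (xs := raw_chunks.map (fun x => safe_int_alt x (-1)))
        (key := fun x => x)
    obtain ⟨hBpw, hBmem⟩ := scan_spec total_chunks s [] none hsorted (by simp)
      (by intro p hp; cases hp) (fun _ => rfl)
    set B := (s.foldl (fun st idx =>
        if (0 ≤ idx ∧ idx < total_chunks) ∧ st.2 ≠ some idx
        then (st.1 ++ [idx], (some idx : Option Int))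
        else st) (([] : List Int), (none : Option Int))).1 with hB
    -- A's set is the Set.ofList of the filtered input
    have hA : raw_chunks.foldl (fun received item =>
          let idx := safe_int item (-1)
          if 0 ≤ idx ∧ idx < total_chunks then PySem.Set.add received idx else received)
          PySem.Set.empty
        = PySem.Set.ofList (raw_chunks.filter (fun x => decide (0 ≤ x ∧ x < total_chunks))) := by
      rw [PySem.Set.ofList_eq_foldl]
      exact foldl_add_if_eq_filter total_chunks raw_chunks PySem.Set.empty
    rw [hA]
    -- both sides list exactly the in-range elements, strictly increasing
    apply PySem.List.sorted_eq_of_perm_of_pairwise_lt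
    · rw [List.perm_ext_iff_of_nodup (hBpw.imp ne_of_lt) (PySem.Set.nodup_ofList _)]
      intro y
      rw [hBmem y, PySem.Set.mem_ofList, List.mem_filter]
      have hys : y ∈ s ↔ y ∈ raw_chunks := by
        rw [hs, PySem.List.mem_sorted, hmap]
      simp only [hys, decide_eq_true_eq]
      tauto
    · simpa using hBpw

-- ===== VERDICT (by name: the statement is the Claim_ definition above) =====
theorem normalize_received_chunks_py_spec : Claim_equal_normalize_received_chunks_py := by
  intro raw_chunks total_chunks _
  unfold Spec_normalize_received_chunks_py
  exact normalize_received_chunks_py_eq raw_chunks total_chunks
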